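-- pv_equiv track=rewrite | github.com/nguyenhuyenag/algorithms | py-algorithm/incomplete/numerical_palindrome_2.py | check_recursive
-- ===== SOURCE A (Python) =====
-- def is_palindrome_segment(s: str, i: int, j: int) -> bool:
--     """ Kiểm tra xem đoạn s[i..j] có phải là chuỗi đối xứng hay không. """
--     subs = s[i:j + 1]
--     return (j - i + 1) >= 2 and subs == subs[::-1]
--
-- def check_recursive(s: str, i: int, j: int) -> bool:
--     if i >= j:
--         return False
--     if is_palindrome_segment(s, i, j):
--         return True
--     return (
--             check_recursive(s, i + 1, j) or
--             check_recursive(s, i, j - 1) or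
--             check_recursive(s, i + 1, j - 1)
--     )
-- ===== SOURCE B (Python) =====
-- def check_recursive(s: str, i: int, j: int) -> bool:
--     # A palindromic substring of length >= 2 exists in s[i..j] iff some pair of
--     # equal characters sits at distance 1 or 2 (the center of such a palindrome).
--     return any(s[k] == s[k + 1] for k in range(i, j)) or \
--            any(s[k] == s[k + 2] for k in range(i, j - 1))
-- ===== Notes on version B (the rewrite author's own statement) =====
-- stated objective: alternative
-- what changed: A's three-way recursion over all index subranges is replaced by a single linear scan of the window for an adjacent-equal or distance-2-equal character pair (the center of any palindrome of length >= 2); Pre_ restricts nontrivial windows to in-range indices 0 <= i, j < len(s), the natural domain, because on windows poking outside the string slicing (A, with Python's clamping of out-of-range bounds) and direct indexing (B) are equally defensible readings that diverge there.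
-- outside the precondition, e.g. on check_recursive('ab', -2, -1): A returns True, B returns False; on check_recursive('abc', -1, 1): A returns True, B returns False; on check_recursive('ab', 0, 5): A returns True, B raises IndexError
import Mathlib
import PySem

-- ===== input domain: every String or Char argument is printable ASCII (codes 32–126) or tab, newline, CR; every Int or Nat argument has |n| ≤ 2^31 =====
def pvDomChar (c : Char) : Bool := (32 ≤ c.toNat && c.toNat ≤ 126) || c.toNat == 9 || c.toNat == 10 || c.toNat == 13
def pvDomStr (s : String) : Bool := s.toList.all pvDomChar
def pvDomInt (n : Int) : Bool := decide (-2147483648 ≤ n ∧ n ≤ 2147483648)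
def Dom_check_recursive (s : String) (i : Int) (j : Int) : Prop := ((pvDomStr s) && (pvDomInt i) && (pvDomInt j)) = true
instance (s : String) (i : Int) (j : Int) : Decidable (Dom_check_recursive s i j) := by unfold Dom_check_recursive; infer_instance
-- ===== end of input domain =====

-- B replaces A's three-way recursion over all index subranges by one linear scan of the
-- window for an adjacent-equal or distance-2-equal character pair (a palindrome's center).

-- ===== PORT A =====
def is_palindrome_segment (s : String) (i : Int) (j : Int) : Bool :=
  -- subs = s[i:j+1]; subs[::-1] is subs.reverse
  let subs := PySem.List.slice s.toList (some i) (some (j + 1))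
  decide ((j - i + 1) ≥ 2) && (subs == subs.reverse)

def check_recursive (s : String) (i : Int) (j : Int) : Bool :=
  if i ≥ j then false
  else if is_palindrome_segment s i j then true
  else (check_recursive s (i + 1) j || check_recursive s i (j - 1) ||
        check_recursive s (i + 1) (j - 1))
termination_by (j - i).toNat
decreasing_by all_goals (simp_wf; omega)

-- ===== PORT B =====
-- any(s[k] == s[k + 1] for k in range(i, j)); under Pre_ every index touched is in
-- range, so the Option equality coincides with Python's character comparison
def adjScan (l : List Char) (lo hi : Int) : Bool :=
  (PySem.List.pyRange lo hi 1).any fun k => PySem.List.pyGet? l k == PySem.List.pyGet? l (k + 1)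

-- any(s[k] == s[k + 2] for k in range(i, j - 1))
def gapScan (l : List Char) (lo hi : Int) : Bool :=
  (PySem.List.pyRange lo (hi - 1) 1).any fun k => PySem.List.pyGet? l k == PySem.List.pyGet? l (k + 2)

def check_recursive_alt (s : String) (i : Int) (j : Int) : Bool :=
  adjScan s.toList i j || gapScan s.toList i j

-- ===== PRECONDITION & SPEC =====
-- Pre_ restricts nontrivial windows (i < j) to in-range indices 0 ≤ i, j < len(s) — the
-- function's natural domain; on windows poking outside the string the two readings of the
-- task diverge with equal right (A slices, and Python clamps out-of-range bounds so some
-- subrange slices to a string of length ≤ 1 that passes its palindrome test; B indexes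
-- directly, so it raises IndexError or reads wrapped negative positions), see cites.
def Pre_check_recursive (s : String) (i : Int) (j : Int) : Prop :=
  j ≤ i ∨ (0 ≤ i ∧ j < (s.toList.length : Int))
instance (s : String) (i : Int) (j : Int) : Decidable (Pre_check_recursive s i j) := by unfold Pre_check_recursive; infer_instance
def pvWitness_check_recursive : String × Int × Int := ("aba", 0, 2)

def Spec_check_recursive (s : String) (i : Int) (j : Int) (out : Bool) : Prop := out = check_recursive_alt s i j
instance (s : String) (i : Int) (j : Int) (out : Bool) : Decidable (Spec_check_recursive s i j out) := by unfold Spec_check_recursive; infer_instance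

-- ===== CLAIM (what is proved, stated in full; the proofs are below) =====
def Claim_equal_check_recursive : Prop := ∀ (s : String) (i : Int) (j : Int), Dom_check_recursive s i j → Pre_check_recursive s i j → Spec_check_recursive s i j (check_recursive s i j)

-- ===== LEMMAS AND PROOFS =====

-- A returns true iff some subrange i ≤ a < b ≤ j passes the palindrome-segment test
def hasPal (s : String) (i j : Int) : Prop :=
  ∃ a b : Int, i ≤ a ∧ a < b ∧ b ≤ j ∧ is_palindrome_segment s a b = true

lemma A_iff_aux (s : String) (m : Nat) : ∀ i j : Int, (j - i).toNat ≤ m →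
    (check_recursive s i j = true ↔ hasPal s i j) := by
  induction m with
  | zero =>
    intro i j hm
    have hij : i ≥ j := by omega
    rw [check_recursive, if_pos hij]
    constructor
    · intro h; exact absurd h (by simp)
    · rintro ⟨a, b, h1, h2, h3, _⟩; omega
  | succ m ih =>
    intro i j hm
    by_cases hij : i ≥ j
    · rw [check_recursive, if_pos hij]
      constructor
      · intro h; exact absurd h (by simp)
      · rintro ⟨a, b, h1, h2, h3, _⟩; omega
    · rw [check_recursive, if_neg hij]
      by_cases hp : is_palindrome_segment s i j = true
      · rw [if_pos hp]
        simp only [true_iff]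
        exact ⟨i, j, le_rfl, by omega, le_rfl, hp⟩
      · rw [if_neg hp]
        have h1 := ih (i + 1) j (by omega)
        have h2 := ih i (j - 1) (by omega)
        have h3 := ih (i + 1) (j - 1) (by omega)
        simp only [Bool.or_eq_true, h1, h2, h3]
        constructor
        · rintro ((⟨a, b, ha, hab, hb, hq⟩ | ⟨a, b, ha, hab, hb, hq⟩) | ⟨a, b, ha, hab, hb, hq⟩) <;>
            exact ⟨a, b, by omega, hab, by omega, hq⟩
        · rintro ⟨a, b, ha, hab, hb, hq⟩
          by_cases hai : a = i
          · by_cases hbj : b = j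
            · subst hai; subst hbj; exact absurd hq hp
            · left; right; exact ⟨a, b, ha, hab, by omega, hq⟩
          · left; left; exact ⟨a, b, by omega, hab, hb, hq⟩

lemma A_iff (s : String) (i j : Int) : check_recursive s i j = true ↔ hasPal s i j :=
  A_iff_aux s (j - i).toNat i j le_rfl

-- a palindrome of length ≥ 2 has an equal pair at its center
lemma center_pair (t : List Char) (h2 : 2 ≤ t.length) (hp : t = t.reverse) :
    (∃ u : Nat, u + 1 < t.length ∧ t[u]? = t[u + 1]?) ∨
    (∃ u : Nat, u + 2 < t.length ∧ t[u]? = t[u + 2]?) := by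
  rcases Nat.even_or_odd t.length with ⟨m, hm⟩ | ⟨m, hm⟩
  · left
    refine ⟨m - 1, by omega, ?_⟩
    calc t[m-1]? = t.reverse[m-1]? := by rw [← hp]
      _ = t[t.length - 1 - (m-1)]? := List.getElem?_reverse (by omega)
      _ = t[(m-1)+1]? := by congr 1; omega
  · right
    refine ⟨m - 1, by omega, ?_⟩
    calc t[m-1]? = t.reverse[m-1]? := by rw [← hp]
      _ = t[t.length - 1 - (m-1)]? := List.getElem?_reverse (by omega)
      _ = t[(m-1)+2]? := by congr 1; omega

-- slices of length 2 and 3 written out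
lemma slice_pair (l : List Char) (k : Nat) (h : k + 1 < l.length) :
    PySem.List.slice l (some (k : Int)) (some ((k : Int) + 2)) = [l[k], l[k + 1]] := by
  rw [PySem.List.slice_toNat l (by omega) (by omega)]
  have h1 : (((k : Int) + 2).toNat - (k : Int).toNat) = 2 := by omega
  rw [h1]
  simp only [Int.toNat_natCast]
  apply List.ext_getElem
  · simp; omega
  · intro u hu1 hu2
    have hu : u < 2 := by simpa using hu2
    simp only [List.getElem_take, List.getElem_drop]
    interval_cases u <;> simp

lemma slice_triple (l : List Char) (k : Nat) (h : k + 2 < l.length) :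
    PySem.List.slice l (some (k : Int)) (some ((k : Int) + 3)) = [l[k], l[k + 1], l[k + 2]] := by
  rw [PySem.List.slice_toNat l (by omega) (by omega)]
  have h1 : (((k : Int) + 3).toNat - (k : Int).toNat) = 3 := by omega
  rw [h1]
  simp only [Int.toNat_natCast]
  apply List.ext_getElem
  · simp; omega
  · intro u hu1 hu2
    have hu : u < 3 := by simpa using hu2
    simp only [List.getElem_take, List.getElem_drop]
    interval_cases u <;> simp

-- pyGet? at a nonnegative in-range index is getElem?
lemma pyGet?_nonneg (l : List Char) (k : Int) (h0 : 0 ≤ k) (h : k < (l.length : Int)) :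
    PySem.List.pyGet? l k = l[k.toNat]? := by
  simp only [PySem.List.pyGet?, PySem.List.pyIdx?, if_pos h0, if_pos h, Option.bind_some]

-- the window equivalence: inside a fully in-range window [lo, hi],
-- "some subrange slice is a palindrome" is "some adjacent or distance-2 pair is equal"
lemma window_iff (l : List Char) (lo hi : Int) (hlo : 0 ≤ lo) (hij : lo < hi)
    (hhi : hi + 1 ≤ (l.length : Int)) :
    (∃ a b : Int, lo ≤ a ∧ a < b ∧ b ≤ hi ∧
      (PySem.List.slice l (some a) (some (b + 1)) ==
       (PySem.List.slice l (some a) (some (b + 1))).reverse) = true) ↔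
    ((∃ k : Int, lo ≤ k ∧ k < hi ∧ l[k.toNat]? = l[(k + 1).toNat]?) ∨
     (∃ k : Int, lo ≤ k ∧ k < hi - 1 ∧ l[k.toNat]? = l[(k + 2).toNat]?)) := by
  constructor
  · rintro ⟨a, b, hla, hab, hbh, hpal⟩
    set t := PySem.List.slice l (some a) (some (b + 1)) with ht
    have heq : t = t.reverse := by simpa using hpal
    have hlen : t.length = (b - a + 1).toNat := by
      rw [ht, PySem.List.length_slice]
      simp only [PySem.List.clampIdx, Nat.min_def]
      split_ifs <;> omega
    have htake : t = List.take ((b + 1).toNat - a.toNat) (List.drop a.toNat l) := by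
      rw [ht, PySem.List.slice_toNat l (by omega) (by omega)]
    have hT : ∀ u : Nat, u < t.length → t[u]? = l[a.toNat + u]? := by
      intro u hu
      have hu' : u < (b + 1).toNat - a.toNat := by omega
      rw [htake, List.getElem?_take, if_pos hu', List.getElem?_drop]
    have h2 : 2 ≤ t.length := by omega
    rcases center_pair t h2 heq with ⟨u, hu, he⟩ | ⟨u, hu, he⟩
    · left
      refine ⟨a + u, by omega, by omega, ?_⟩
      have e1 := hT u (by omega)
      have e2 := hT (u + 1) hu
      have c1 : (a + (u : Int)).toNat = a.toNat + u := by omega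
      have c2 : (a + (u : Int) + 1).toNat = a.toNat + (u + 1) := by omega
      rw [c1, c2, ← e1, ← e2, he]
    · right
      refine ⟨a + u, by omega, by omega, ?_⟩
      have e1 := hT u (by omega)
      have e2 := hT (u + 2) hu
      have c1 : (a + (u : Int)).toNat = a.toNat + u := by omega
      have c2 : (a + (u : Int) + 2).toNat = a.toNat + (u + 2) := by omega
      rw [c1, c2, ← e1, ← e2, he]
  · rintro (⟨k, hlk, hkh, he⟩ | ⟨k, hlk, hkh, he⟩)
    · refine ⟨k, k + 1, hlk, by omega, by omega, ?_⟩
      have hk1 : k.toNat + 1 < l.length := by omega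
      have hs : PySem.List.slice l (some k) (some (k + 1 + 1)) = [l[k.toNat], l[k.toNat + 1]] := by
        have hsp := slice_pair l k.toNat hk1
        have ck : ((k.toNat : Nat) : Int) = k := by omega
        rw [ck] at hsp
        rw [show k + 1 + 1 = k + 2 by ring, hsp]
      have hval : l[k.toNat] = l[k.toNat + 1] := by
        have e1 : l[k.toNat]? = some l[k.toNat] := List.getElem?_eq_getElem (by omega)
        have e2 : l[(k + 1).toNat]? = some l[k.toNat + 1] := by
          rw [show (k + 1).toNat = k.toNat + 1 by omega]
          exact List.getElem?_eq_getElem hk1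
        rw [e1, e2] at he
        exact Option.some.inj he
      rw [hs]
      simp [hval]
    · refine ⟨k, k + 2, hlk, by omega, by omega, ?_⟩
      have hk2 : k.toNat + 2 < l.length := by omega
      have hs : PySem.List.slice l (some k) (some (k + 2 + 1)) = [l[k.toNat], l[k.toNat + 1], l[k.toNat + 2]] := by
        have hsp := slice_triple l k.toNat hk2
        have ck : ((k.toNat : Nat) : Int) = k := by omega
        rw [ck] at hsp
        rw [show k + 2 + 1 = k + 3 by ring, hsp]
      have hval : l[k.toNat] = l[k.toNat + 2] := by
        have e1 : l[k.toNat]? = some l[k.toNat] := List.getElem?_eq_getElem (by omega)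
        have e2 : l[(k + 2).toNat]? = some l[k.toNat + 2] := by
          rw [show (k + 2).toNat = k.toNat + 2 by omega]
          exact List.getElem?_eq_getElem hk2
        rw [e1, e2] at he
        exact Option.some.inj he
      rw [hs]
      simp [hval]

-- hasPal with the always-true length condition stripped
lemma hasPal_win (s : String) (i j : Int) :
    hasPal s i j ↔ ∃ a b : Int, i ≤ a ∧ a < b ∧ b ≤ j ∧
      (PySem.List.slice s.toList (some a) (some (b + 1)) ==
       (PySem.List.slice s.toList (some a) (some (b + 1))).reverse) = true := by
  constructor
  · rintro ⟨a, b, ha, hab, hb, hq⟩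
    simp only [is_palindrome_segment, Bool.and_eq_true, decide_eq_true_eq] at hq
    exact ⟨a, b, ha, hab, hb, hq.2⟩
  · rintro ⟨a, b, ha, hab, hb, hq⟩
    refine ⟨a, b, ha, hab, hb, ?_⟩
    simp only [is_palindrome_segment, Bool.and_eq_true, decide_eq_true_eq]
    exact ⟨by omega, hq⟩

-- the scans read as existentials over in-range indices
lemma adjScan_iff (l : List Char) (lo hi : Int) (hlo : 0 ≤ lo) (hhi : hi + 1 ≤ (l.length : Int)) :
    adjScan l lo hi = true ↔ ∃ k : Int, lo ≤ k ∧ k < hi ∧ l[k.toNat]? = l[(k + 1).toNat]? := by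
  unfold adjScan
  rw [List.any_eq_true]
  constructor
  · rintro ⟨k, hk, hb⟩
    rw [PySem.List.mem_pyRange_one] at hk
    refine ⟨k, hk.1, hk.2, ?_⟩
    rw [beq_iff_eq, pyGet?_nonneg l k (by omega) (by omega),
        pyGet?_nonneg l (k + 1) (by omega) (by omega)] at hb
    exact hb
  · rintro ⟨k, h1, h2, he⟩
    refine ⟨k, PySem.List.mem_pyRange_one.mpr ⟨h1, h2⟩, ?_⟩
    rw [beq_iff_eq, pyGet?_nonneg l k (by omega) (by omega),
        pyGet?_nonneg l (k + 1) (by omega) (by omega)]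
    exact he

lemma gapScan_iff (l : List Char) (lo hi : Int) (hlo : 0 ≤ lo) (hhi : hi + 1 ≤ (l.length : Int)) :
    gapScan l lo hi = true ↔ ∃ k : Int, lo ≤ k ∧ k < hi - 1 ∧ l[k.toNat]? = l[(k + 2).toNat]? := by
  unfold gapScan
  rw [List.any_eq_true]
  constructor
  · rintro ⟨k, hk, hb⟩
    rw [PySem.List.mem_pyRange_one] at hk
    refine ⟨k, hk.1, hk.2, ?_⟩
    rw [beq_iff_eq, pyGet?_nonneg l k (by omega) (by omega),
        pyGet?_nonneg l (k + 2) (by omega) (by omega)] at hb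
    exact hb
  · rintro ⟨k, h1, h2, he⟩
    refine ⟨k, PySem.List.mem_pyRange_one.mpr ⟨h1, h2⟩, ?_⟩
    rw [beq_iff_eq, pyGet?_nonneg l k (by omega) (by omega),
        pyGet?_nonneg l (k + 2) (by omega) (by omega)]
    exact he

-- ===== VERDICT (by name: the statement is the Claim_ definition above) =====
theorem check_recursive_spec : Claim_equal_check_recursive := by
  intro s i j _ hpre
  unfold Spec_check_recursive
  rw [Bool.eq_iff_iff, A_iff]
  by_cases hij : i ≥ j
  · have e1 : PySem.List.pyRange i j = [] := PySem.List.pyRange_one_eq_nil (by omega)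
    have e2 : PySem.List.pyRange i (j - 1) = [] := PySem.List.pyRange_one_eq_nil (by omega)
    simp only [check_recursive_alt, adjScan, gapScan, e1, e2, List.any_nil, Bool.or_false]
    constructor
    · rintro ⟨a, b, h1, h2, h3, _⟩; omega
    · intro h; exact absurd h (by simp)
  · have h1 : 0 ≤ i ∧ j < (s.toList.length : Int) := by
      rcases hpre with h | h
      · omega
      · exact h
    simp only [check_recursive_alt, Bool.or_eq_true,
      adjScan_iff s.toList i j h1.1 (by omega),
      gapScan_iff s.toList i j h1.1 (by omega),
      hasPal_win]
    exact window_iff s.toList i j h1.1 (by omega) (by omega)
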